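-- pv_equiv track=rewrite | github.com/Nishantppanchal/RSA-key-generator | RSA.py | convert_to_char
-- ===== SOURCE A (Python) =====
-- def convert_to_char(blocks):
--     text = ''
--     for block in blocks:
--         blockStr = str(block)
--         while len(blockStr) % 3 != 0:
--             blockStr = '0' + blockStr
--         for i in range(0, len(blockStr) - 1, 3):
--             subBlockInt = int(blockStr[i: i + 3])
--             text += chr(subBlockInt)
--     return text
-- ===== SOURCE B (Python) =====
-- def convert_to_char(blocks):
--     parts = []
--     for block in blocks:
--         chars = [chr(block % 1000)]
--         n = block // 1000
--         while n > 0: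
--             chars.append(chr(n % 1000))
--             n //= 1000
--         chars.reverse()
--         parts.append(''.join(chars))
--     return ''.join(parts)
-- ===== Notes on version B (the rewrite author's own statement) =====
-- stated objective: faster
-- what changed: Decodes each block by integer arithmetic (repeated divmod by 1000) instead of converting the block to a decimal string, zero-padding it and re-parsing 3-character slices with int(); per-block characters are collected in a list and joined instead of repeated string concatenation.
import Mathlib
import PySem

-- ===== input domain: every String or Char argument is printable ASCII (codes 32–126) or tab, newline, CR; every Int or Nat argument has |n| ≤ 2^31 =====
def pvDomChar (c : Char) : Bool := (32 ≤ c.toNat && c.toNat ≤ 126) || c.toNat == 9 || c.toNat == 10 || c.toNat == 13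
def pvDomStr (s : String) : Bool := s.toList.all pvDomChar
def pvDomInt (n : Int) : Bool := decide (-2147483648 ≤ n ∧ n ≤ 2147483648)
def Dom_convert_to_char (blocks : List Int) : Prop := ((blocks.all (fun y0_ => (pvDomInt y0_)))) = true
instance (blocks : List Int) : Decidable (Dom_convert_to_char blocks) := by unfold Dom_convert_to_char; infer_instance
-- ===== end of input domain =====

-- B decodes each block by integer divmod-by-1000 arithmetic instead of A's
-- string-format / zero-pad / reparse-with-int() round trip (objective: faster, constant-factor).

-- ===== PORT A =====
-- the 'while len(blockStr) % 3 != 0: blockStr = "0" + blockStr' loop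
def pvPadA (s : List Char) : List Char :=
  if s.length % 3 = 0 then s else pvPadA ('0' :: s)
termination_by (3 - s.length % 3) % 3
decreasing_by simp only [List.length_cons]; omega

def convert_to_char (blocks : List Int) : String :=
  -- text is built as a List Char ('text += chr(...)' appends one char); String.ofList at the end
  String.ofList (blocks.foldl (fun text block =>
    let blockStr := pvPadA (PySem.Int.toChars block)
    (PySem.List.pyRange 0 ((blockStr.length : Int) - 1) 3).foldl (fun t i =>
      -- int(blockStr[i:i+3]): Pre_ excludes negative blocks, where int()/chr() raises (ofChars? = none); .getD 0 is never taken inside Pre_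
      let subBlockInt := (PySem.Int.ofChars? (PySem.List.slice blockStr (some i) (some (i + 3)))).getD 0
      t ++ [Char.ofNat subBlockInt.toNat]) text) [])

-- ===== PORT B =====
-- the 'while n > 0: chars.append(chr(n % 1000)); n //= 1000' loop
def pvBLoop (n : Int) (chars : List Char) : List Char :=
  if 0 < n then
    pvBLoop (PySem.Int.floordiv n 1000) (chars ++ [Char.ofNat (PySem.Int.mod n 1000).toNat])
  else chars
termination_by n.toNat
decreasing_by
  rw [PySem.Int.floordiv_eq_ediv_of_pos (by omega : (0:Int) < 1000)]; omega

def convert_to_char_alt (blocks : List Int) : String :=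
  String.ofList ((blocks.map (fun block =>
    (pvBLoop (PySem.Int.floordiv block 1000)
      [Char.ofNat (PySem.Int.mod block 1000).toNat]).reverse)).flatten)

-- ===== PRECONDITION & SPEC =====
-- Pre_ excludes negative blocks: there A raises (ValueError, from int() on a padded
-- string containing '-' or from chr() of a negative number) and returns nothing.
def Pre_convert_to_char (blocks : List Int) : Prop := ∀ b ∈ blocks, 0 ≤ b
instance (blocks : List Int) : Decidable (Pre_convert_to_char blocks) := by
  unfold Pre_convert_to_char; infer_instance

def pvWitness_convert_to_char : List Int := [72, 101, 0, 72101108, 999]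

def Spec_convert_to_char (blocks : List Int) (out : String) : Prop := out = convert_to_char_alt blocks
instance (blocks : List Int) (out : String) : Decidable (Spec_convert_to_char blocks out) := by unfold Spec_convert_to_char; infer_instance

-- ===== CLAIM (what is proved, stated in full; the proofs are below) =====
def Claim_equal_convert_to_char : Prop := ∀ (blocks : List Int), Dom_convert_to_char blocks → Pre_convert_to_char blocks → Spec_convert_to_char blocks (convert_to_char blocks)

-- ===== LEMMAS AND PROOFS =====

-- the decoded characters of one block, most significant base-1000 digit first
def pvD (n : Nat) : List Char :=
  if n < 1000 then [Char.ofNat n] else pvD (n / 1000) ++ [Char.ofNat (n % 1000)]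
decreasing_by omega

-- the same characters, least significant first (the order B's loop emits them)
def pvE (n : Nat) : List Char :=
  if n = 0 then [] else Char.ofNat (n % 1000) :: pvE (n / 1000)
decreasing_by omega

-- A's inner group loop as a function of the padded char list
def pvGFold (p : List Char) (text : List Char) : List Char :=
  (PySem.List.pyRange 0 ((p.length : Int) - 1) 3).foldl (fun t i =>
    t ++ [Char.ofNat ((PySem.Int.ofChars? (PySem.List.slice p (some i) (some (i + 3)))).getD 0).toNat]) text

lemma pvPadA_eq (s : List Char) :
    pvPadA s = List.replicate ((3 - s.length % 3) % 3) '0' ++ s := by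
  fun_induction pvPadA s with
  | case1 s h => simp [h]
  | case2 s h ih =>
      rw [ih]
      have hk : (3 - s.length % 3) % 3 = (3 - ('0'::s).length % 3) % 3 + 1 := by
        simp only [List.length_cons]; omega
      rw [hk, List.replicate_succ', List.append_assoc]
      rfl

lemma pvPad_len (s : List Char) : (pvPadA s).length % 3 = 0 := by
  rw [pvPadA_eq]; simp; omega

lemma pvTdc_acc (fuel : Nat) : ∀ (n : Nat) (ds : List Char), n < fuel →
    Nat.toDigitsCore 10 fuel n ds = Nat.toDigitsCore 10 fuel n [] ++ ds := by
  induction fuel with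
  | zero => intro n ds h; omega
  | succ f ih =>
      intro n ds h
      simp only [Nat.toDigitsCore]
      by_cases h10 : n / 10 = 0
      · simp [h10]
      · simp only [h10, if_false]
        rw [ih (n / 10) _ (by omega), ih (n / 10) [_] (by omega), List.append_assoc]
        rfl

lemma pvTdc_fuel (f1 : Nat) : ∀ (f2 n : Nat), n < f1 → n < f2 →
    Nat.toDigitsCore 10 f1 n [] = Nat.toDigitsCore 10 f2 n [] := by
  induction f1 with
  | zero => intro f2 n h1 _; omega
  | succ f ih =>
      intro f2 n h1 h2
      cases f2 with
      | zero => omega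
      | succ g =>
          simp only [Nat.toDigitsCore]
          by_cases h10 : n / 10 = 0
          · simp [h10]
          · simp only [h10, if_false]
            rw [pvTdc_acc f _ _ (by omega), pvTdc_acc g _ _ (by omega),
              ih g (n / 10) (by omega) (by omega)]

lemma pvToDigits_small {n : Nat} (h : n < 10) :
    Nat.toDigits 10 n = [Nat.digitChar n] := by
  simp [Nat.toDigits, Nat.toDigitsCore, Nat.div_eq_of_lt h, Nat.mod_eq_of_lt h]

lemma pvToDigits_step {n : Nat} (h : 10 ≤ n) :
    Nat.toDigits 10 n = Nat.toDigits 10 (n / 10) ++ [Nat.digitChar (n % 10)] := by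
  unfold Nat.toDigits
  conv_lhs => rw [Nat.toDigitsCore]
  have h10 : ¬ n / 10 = 0 := by omega
  simp only [h10, if_false]
  rw [pvTdc_acc n _ _ (by omega), pvTdc_fuel n (n / 10 + 1) (n / 10) (by omega) (by omega)]

lemma pvToDigits_step1000 {n : Nat} (h : 1000 ≤ n) :
    Nat.toDigits 10 n = Nat.toDigits 10 (n / 1000) ++
      [Nat.digitChar (n / 100 % 10), Nat.digitChar (n / 10 % 10), Nat.digitChar (n % 10)] := by
  rw [pvToDigits_step (by omega : 10 ≤ n),
    pvToDigits_step (by omega : 10 ≤ n / 10),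
    pvToDigits_step (by omega : 10 ≤ n / 10 / 10)]
  have e1 : n / 10 / 10 = n / 100 := by omega
  have e2 : n / 100 / 10 = n / 1000 := by omega
  rw [e1, e2, List.append_assoc, List.append_assoc]
  rfl

lemma pvPad_small {n : Nat} (h : n < 1000) :
    pvPadA (Nat.toDigits 10 n) =
      [Nat.digitChar (n / 100), Nat.digitChar (n / 10 % 10), Nat.digitChar (n % 10)] := by
  by_cases h10 : n < 10
  · rw [pvToDigits_small h10, pvPadA_eq]
    have e100 : n / 100 = 0 := by omega
    have e10 : n / 10 = 0 := by omega
    have em : n % 10 = n := by omega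
    simp [e100, e10, em, List.replicate]
    rfl
  · by_cases h100 : n < 100
    · rw [pvToDigits_step (by omega), pvToDigits_small (show n / 10 < 10 by omega), pvPadA_eq]
      have e100 : n / 100 = 0 := by omega
      have e10 : n / 10 % 10 = n / 10 := by omega
      simp [e100, e10]
      rfl
    · rw [pvToDigits_step (by omega), pvToDigits_step (show 10 ≤ n / 10 by omega),
        pvToDigits_small (show n / 10 / 10 < 10 by omega), pvPadA_eq]
      have e1 : n / 10 / 10 = n / 100 := by omega
      simp [e1]

lemma pvPad_big {n : Nat} (h : 1000 ≤ n) :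
    pvPadA (Nat.toDigits 10 n) = pvPadA (Nat.toDigits 10 (n / 1000)) ++
      [Nat.digitChar (n / 100 % 10), Nat.digitChar (n / 10 % 10), Nat.digitChar (n % 10)] := by
  rw [pvToDigits_step1000 h, pvPadA_eq, pvPadA_eq]
  have hlen : (Nat.toDigits 10 (n / 1000) ++
      [Nat.digitChar (n / 100 % 10), Nat.digitChar (n / 10 % 10), Nat.digitChar (n % 10)]).length % 3
      = (Nat.toDigits 10 (n / 1000)).length % 3 := by
    simp
  rw [hlen, List.append_assoc]

lemma pvParse3 : ∀ (a b c : Fin 10),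
    PySem.Int.ofChars? [Nat.digitChar a, Nat.digitChar b, Nat.digitChar c] =
      some ((100 * a.val + 10 * b.val + c.val : Nat) : Int) := by
  decide

lemma pvParse3' {a b c : Nat} (ha : a < 10) (hb : b < 10) (hc : c < 10) :
    PySem.Int.ofChars? [Nat.digitChar a, Nat.digitChar b, Nat.digitChar c] =
      some ((100 * a + 10 * b + c : Nat) : Int) :=
  pvParse3 ⟨a, ha⟩ ⟨b, hb⟩ ⟨c, hc⟩

lemma pvRange3 (g : Nat) :
    PySem.List.pyRange 0 (3 * (g : Int) - 1) 3 = (List.range g).map (fun k => ((3 * k : Nat) : Int)) := by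
  rw [PySem.List.pyRange_of_pos 0 (3 * (g : Int) - 1) (by omega)]
  have hcount : (if (0:Int) < 3 * (g : Int) - 1
      then ((3 * (g : Int) - 1 - 0 + 3 - 1) / 3).toNat else 0) = g := by
    rcases Nat.eq_zero_or_pos g with hg | hg
    · subst hg; norm_num
    · have hg1 : (1 : Int) ≤ (g : Int) := by exact_mod_cast hg
      rw [if_pos (by omega)]
      omega
  rw [hcount]
  exact List.map_congr_left (fun k hk => by push_cast; ring)

lemma pvGFold_nil (text : List Char) : pvGFold [] text = text := by
  unfold pvGFold
  rw [show ((List.length ([] : List Char) : Int)) - 1 = 3 * ((0 : Nat) : Int) - 1 by simp, pvRange3]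
  simp

lemma pvGFold_append (p r text : List Char) (hp : p.length % 3 = 0) (hr : r.length = 3) :
    pvGFold (p ++ r) text =
      pvGFold p text ++ [Char.ofNat ((PySem.Int.ofChars? r).getD 0).toNat] := by
  obtain ⟨g, hg⟩ : ∃ g, p.length = 3 * g := ⟨p.length / 3, by omega⟩
  unfold pvGFold
  have h1 : ((p ++ r).length : Int) - 1 = 3 * ((g + 1 : Nat) : Int) - 1 := by
    simp [List.length_append, hg, hr]; ring
  have h2 : ((p.length : Int)) - 1 = 3 * ((g : Nat) : Int) - 1 := by
    rw [hg]; push_cast; ring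
  rw [h1, h2, pvRange3, pvRange3, List.range_succ, List.map_append, List.foldl_append]
  simp only [List.map_cons, List.map_nil, List.foldl_cons, List.foldl_nil]
  have hslice : PySem.List.slice (p ++ r) (some ((3 * g : Nat) : Int)) (some (((3 * g : Nat) : Int) + 3)) = r := by
    rw [show ((3 * g : Nat) : Int) + 3 = ((3 * g + 3 : Nat) : Int) by push_cast; ring,
      PySem.List.slice_natCast, Nat.add_sub_cancel_left,
      show (3 * g) = p.length from hg.symm, List.drop_left, ← hr, List.take_length]
  rw [hslice]
  congr 1
  rw [List.foldl_map, List.foldl_map]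
  apply PySem.List.foldl_congr_mem
  intro acc k hk
  have hkg : k < g := List.mem_range.mp hk
  have hsl : PySem.List.slice (p ++ r) (some ((3 * k : Nat) : Int)) (some (((3 * k : Nat) : Int) + 3))
      = PySem.List.slice p (some ((3 * k : Nat) : Int)) (some (((3 * k : Nat) : Int) + 3)) := by
    rw [show ((3 * k : Nat) : Int) + 3 = ((3 * k + 3 : Nat) : Int) by push_cast; ring,
      PySem.List.slice_natCast, PySem.List.slice_natCast, Nat.add_sub_cancel_left,
      List.drop_append_of_le_length (by omega),
      List.take_append_of_le_length (by simp [hg]; omega)]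
  rw [hsl]

lemma pvAblock (n : Nat) : ∀ text, pvGFold (pvPadA (Nat.toDigits 10 n)) text = text ++ pvD n := by
  induction n using Nat.strong_induction_on with
  | _ n ih =>
    intro text
    by_cases hn : n < 1000
    · rw [pvPad_small hn,
        show ([Nat.digitChar (n / 100), Nat.digitChar (n / 10 % 10), Nat.digitChar (n % 10)] : List Char)
          = [] ++ [Nat.digitChar (n / 100), Nat.digitChar (n / 10 % 10), Nat.digitChar (n % 10)] from rfl,
        pvGFold_append [] _ text (by simp) (by simp), pvGFold_nil,
        pvParse3' (by omega) (by omega) (by omega)]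
      rw [pvD, if_pos hn]
      simp only [Option.getD_some, Int.toNat_natCast]
      rw [show 100 * (n / 100) + 10 * (n / 10 % 10) + n % 10 = n by omega]
    · rw [pvPad_big (by omega), pvGFold_append _ _ text (pvPad_len _) rfl,
        ih (n / 1000) (by omega) text,
        pvParse3' (by omega) (by omega) (by omega)]
      conv_rhs => rw [pvD]
      rw [if_neg hn]
      simp only [Option.getD_some, Int.toNat_natCast]
      rw [show 100 * (n / 100 % 10) + 10 * (n / 10 % 10) + n % 10 = n % 1000 by omega,
        List.append_assoc]

lemma pvBLoop_spec (n : Nat) : ∀ acc, pvBLoop (n : Int) acc = acc ++ pvE n := by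
  induction n using Nat.strong_induction_on with
  | _ n ih =>
    intro acc
    by_cases h0 : n = 0
    · subst h0
      rw [pvBLoop, if_neg (by omega), pvE]
      simp
    · rw [pvBLoop, if_pos (by exact_mod_cast Nat.pos_of_ne_zero h0),
        PySem.Int.floordiv_eq_ediv_of_pos (by omega : (0:Int) < 1000),
        PySem.Int.mod_eq_emod_of_pos (by omega : (0:Int) < 1000)]
      have hdiv : (n : Int) / 1000 = ((n / 1000 : Nat) : Int) := by omega
      have hmod : ((n : Int) % 1000).toNat = n % 1000 := by omega
      rw [hdiv, hmod, ih (n / 1000) (by omega)]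
      conv_rhs => rw [pvE]
      rw [if_neg h0]
      simp

lemma pvD_eq_revE (n : Nat) :
    pvD n = (pvE (n / 1000)).reverse ++ [Char.ofNat (n % 1000)] := by
  induction n using Nat.strong_induction_on with
  | _ n ih =>
    by_cases hn : n < 1000
    · rw [pvD, if_pos hn, show n / 1000 = 0 by omega, pvE]
      simp [show n % 1000 = n by omega]
    · rw [pvD, if_neg hn, ih (n / 1000) (by omega)]
      conv_rhs => rw [pvE]
      rw [if_neg (show ¬ n / 1000 = 0 by omega)]
      simp

lemma pvTop (bs : List Int) (h : ∀ b ∈ bs, 0 ≤ b) : ∀ text,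
    bs.foldl (fun text block => pvGFold (pvPadA (PySem.Int.toChars block)) text) text
      = text ++ (bs.map (fun block =>
          (pvBLoop (PySem.Int.floordiv block 1000)
            [Char.ofNat (PySem.Int.mod block 1000).toNat]).reverse)).flatten := by
  induction bs with
  | nil => intro text; simp
  | cons b bs ih =>
      intro text
      simp only [List.foldl_cons, List.map_cons, List.flatten_cons]
      have hb : 0 ≤ b := h b (by simp)
      have hch : PySem.Int.toChars b = Nat.toDigits 10 b.toNat := by
        simp [PySem.Int.toChars, not_lt.mpr hb]
      have hB : (pvBLoop (PySem.Int.floordiv b 1000)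
          [Char.ofNat (PySem.Int.mod b 1000).toNat]).reverse = pvD b.toNat := by
        obtain ⟨m, rfl⟩ : ∃ m : Nat, b = (m : Int) := ⟨b.toNat, by omega⟩
        rw [PySem.Int.floordiv_eq_ediv_of_pos (by omega : (0:Int) < 1000),
          PySem.Int.mod_eq_emod_of_pos (by omega : (0:Int) < 1000)]
        have hdiv : (m : Int) / 1000 = ((m / 1000 : Nat) : Int) := by omega
        have hmod : ((m : Int) % 1000).toNat = m % 1000 := by omega
        rw [hdiv, hmod, pvBLoop_spec, pvD_eq_revE, Int.toNat_natCast]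
        simp
      rw [hch, pvAblock, hB, ih (fun x hx => h x (by simp [hx]))]
      simp [List.append_assoc]

lemma pvA_eq (bs : List Int) : convert_to_char bs
    = String.ofList (bs.foldl (fun text block => pvGFold (pvPadA (PySem.Int.toChars block)) text) []) := rfl

-- ===== VERDICT (by name: the statement is the Claim_ definition above) =====
theorem convert_to_char_spec : Claim_equal_convert_to_char := by
  intro blocks _ hpre
  show convert_to_char blocks = convert_to_char_alt blocks
  rw [pvA_eq, convert_to_char_alt]
  congr 1
  rw [pvTop blocks hpre []]
  rfl
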